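-- pv_equiv track=rewrite | github.com/sofievargas/barrett-fellows | methods.py | triad_7
-- ===== SOURCE A (Python) =====
-- def triad_7 (nodes, edges):
--     # b <- a -> c -> b
--         triads = set()
--         count = 0
--         for node_a in nodes:
--             for node_b in nodes:
--                 if node_b != node_a: #skip if they are the same node
--                     edge_one = (node_a, node_b) #a -> b
--                     inverse_edge_one = (node_b, node_a) #a <- b
--                     if (edge_one in edges) and (inverse_edge_one not in edges):
--                         for node_c in nodes:
--                             if node_c != node_b and node_c != node_a:
--                                     edge_two = (node_a, node_c) #a -> c
--                                     inverse_edge_two = (node_c, node_a) #c <- a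
--                                     edge_three = (node_c, node_b) #c -> b
--                                     inverse_edge_three = (node_b, node_c) #b -> c
--                                     if edge_three != edge_two and edge_two != edge_one:
--                                         if edge_three in edges and edge_two in edges and inverse_edge_two not in edges and inverse_edge_three not in edges:
--                                             sorted_nodes = sorted([node_a, node_b, node_c])
--                                             triad = tuple(sorted_nodes)
--                                             if triad not in triads:
--                                                 triads.add(triad)
--                                                 count+=1
--         return count
-- ===== SOURCE B (Python) =====
-- def triad_7(nodes, edges):
--     # b <- a -> c -> b : enumerate single (one-way) edges and common neighbors
--     # instead of all node triples.  The induced pattern a->b, a->c, c->b with all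
--     # reverse edges absent has a unique role assignment per node triple, so no
--     # dedup set is needed.
--     nodeset = set(nodes)
--     eset = set(edges)
--     single = [(u, v) for (u, v) in eset
--               if u in nodeset and v in nodeset and u != v and (v, u) not in eset]
--     singleset = set(single)
--     out = {}
--     for u, v in single:
--         out.setdefault(u, []).append(v)
--     count = 0
--     for a, c in single:
--         for b in out.get(c, []):
--             if (a, b) in singleset:
--                 count += 1
--     return count
-- ===== Notes on version B (the rewrite author's own statement) =====
-- stated objective: faster
-- what changed: Replaces A's O(n^3) scan over all node triples (with linear 'in edges' list membership tests and a dedup set of sorted triads) by building node/edge hash sets once, extracting the one-way edge list, grouping it into an out-adjacency dict, and counting common neighbors per one-way edge; the motif's role assignment is unique per triple, so each triad is counted exactly once and the dedup set disappears.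
import Mathlib
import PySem

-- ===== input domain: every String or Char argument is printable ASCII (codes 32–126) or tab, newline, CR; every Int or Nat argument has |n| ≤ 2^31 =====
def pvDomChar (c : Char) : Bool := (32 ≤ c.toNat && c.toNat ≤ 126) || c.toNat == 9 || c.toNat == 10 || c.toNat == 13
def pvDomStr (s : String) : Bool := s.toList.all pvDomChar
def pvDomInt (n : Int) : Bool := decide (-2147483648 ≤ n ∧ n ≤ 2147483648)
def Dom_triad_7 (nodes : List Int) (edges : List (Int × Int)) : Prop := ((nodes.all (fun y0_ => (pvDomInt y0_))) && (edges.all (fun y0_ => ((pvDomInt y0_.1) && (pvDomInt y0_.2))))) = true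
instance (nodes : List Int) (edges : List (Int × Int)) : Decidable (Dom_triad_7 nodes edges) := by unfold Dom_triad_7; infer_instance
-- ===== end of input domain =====

-- B replaces A's triple loop over all node triples (with a dedup set of sorted triads)
-- by enumeration over the one-way ("single") edges and common neighbors; the motif has a
-- unique role assignment per triple, so each triad is produced exactly once. Objective: faster.


-- ===== PORT A =====
-- state: (triads, count); the sorted triple [a,b,c] is the tuple added to the set
def triad_7 (nodes : List Int) (edges : List (Int × Int)) : Int :=
  (nodes.foldl (fun (st : PySem.Set (List Int) × Int) node_a =>
    nodes.foldl (fun st node_b =>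
      if node_b ≠ node_a then
        if (node_a, node_b) ∈ edges ∧ (node_b, node_a) ∉ edges then
          nodes.foldl (fun st node_c =>
            if node_c ≠ node_b ∧ node_c ≠ node_a then
              if (node_c, node_b) ≠ (node_a, node_c) ∧ (node_a, node_c) ≠ (node_a, node_b) then
                if (node_c, node_b) ∈ edges ∧ (node_a, node_c) ∈ edges ∧
                   (node_c, node_a) ∉ edges ∧ (node_b, node_c) ∉ edges then
                  let triad := PySem.List.sorted [node_a, node_b, node_c] (fun x => x) false
                  if triad ∉ st.1 then (PySem.Set.add st.1 triad, st.2 + 1) else st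
                else st
              else st
            else st) st
        else st
      else st) st) (PySem.Set.empty, (0 : Int))).2

-- ===== PORT B =====
def triad_7_alt (nodes : List Int) (edges : List (Int × Int)) : Int :=
  let nodeset : PySem.Set Int := PySem.Set.ofList nodes
  let eset : PySem.Set (Int × Int) := PySem.Set.ofList edges
  let single : List (Int × Int) := eset.filter (fun p =>
      decide (p.1 ∈ nodeset) && decide (p.2 ∈ nodeset) && decide (p.1 ≠ p.2) &&
      !decide ((p.2, p.1) ∈ eset))
  let singleset : PySem.Set (Int × Int) := PySem.Set.ofList single
  let out : PySem.Dict Int (List Int) :=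
    single.foldl (fun d p => d.modify p.1 [] (· ++ [p.2])) PySem.Dict.empty
  single.foldl (fun cnt p =>
    (out.getD p.2 []).foldl (fun cnt b =>
      if (p.1, b) ∈ singleset then cnt + 1 else cnt) cnt) 0

-- ===== PRECONDITION & SPEC =====
def Spec_triad_7 (nodes : List Int) (edges : List (Int × Int)) (out : Int) : Prop := out = triad_7_alt nodes edges
instance (nodes : List Int) (edges : List (Int × Int)) (out : Int) : Decidable (Spec_triad_7 nodes edges out) := by unfold Spec_triad_7; infer_instance

-- ===== CLAIM (what is proved, stated in full; the proofs are below) =====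
def Claim_equal_triad_7 : Prop := ∀ (nodes : List Int) (edges : List (Int × Int)), Dom_triad_7 nodes edges → Spec_triad_7 nodes edges (triad_7 nodes edges)

-- ===== LEMMAS AND PROOFS =====

-- the "single" (one-way) edge predicate between listed nodes
def pvSgl (nodes : List Int) (edges : List (Int × Int)) (p : Int × Int) : Prop :=
  p ∈ edges ∧ p.1 ∈ nodes ∧ p.2 ∈ nodes ∧ p.1 ≠ p.2 ∧ (p.2, p.1) ∉ edges

-- B's `single` list, as a standalone definition
def pvSingleL (nodes : List Int) (edges : List (Int × Int)) : List (Int × Int) :=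
  (PySem.Set.ofList edges).filter (fun p =>
      decide (p.1 ∈ PySem.Set.ofList nodes) && decide (p.2 ∈ PySem.Set.ofList nodes) &&
      decide (p.1 ≠ p.2) && !decide ((p.2, p.1) ∈ PySem.Set.ofList edges))

lemma mem_pvSingleL (nodes : List Int) (edges : List (Int × Int)) (p : Int × Int) :
    p ∈ pvSingleL nodes edges ↔ pvSgl nodes edges p := by
  simp [pvSingleL, pvSgl, List.mem_filter, PySem.Set.mem_ofList]
  tauto

lemma nodup_pvSingleL (nodes : List Int) (edges : List (Int × Int)) :
    (pvSingleL nodes edges).Nodup :=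
  (PySem.Set.nodup_ofList edges).filter _

-- a qualifying role-assigned triple (a, b, c):  a->b, a->c, c->b all single
def pvQual (nodes : List Int) (edges : List (Int × Int)) (t : Int × Int × Int) : Prop :=
  pvSgl nodes edges (t.1, t.2.1) ∧ pvSgl nodes edges (t.1, t.2.2) ∧ pvSgl nodes edges (t.2.2, t.2.1)

def pvQualB (nodes : List Int) (edges : List (Int × Int)) (t : Int × Int × Int) : Bool :=
  decide ((t.1, t.2.1) ∈ pvSingleL nodes edges) &&
  decide ((t.1, t.2.2) ∈ pvSingleL nodes edges) &&
  decide ((t.2.2, t.2.1) ∈ pvSingleL nodes edges)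

-- the finset of qualifying triples
def pvT (nodes : List Int) (edges : List (Int × Int)) : Finset (Int × Int × Int) :=
  (nodes.toFinset ×ˢ nodes.toFinset ×ˢ nodes.toFinset).filter
    (fun t => pvQualB nodes edges t = true)

def pvKey (t : Int × Int × Int) : List Int :=
  PySem.List.sorted [t.1, t.2.1, t.2.2] (fun x => x) false

-- common b's for a single edge p = (a, c)
def pvFib (nodes : List Int) (edges : List (Int × Int)) (p : Int × Int) : Finset Int :=
  nodes.toFinset.filter
    (fun b => (p.2, b) ∈ pvSingleL nodes edges ∧ (p.1, b) ∈ pvSingleL nodes edges)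

-- ---------- B characterization ----------
lemma fib_count (nodes : List Int) (edges : List (Int × Int)) (p : Int × Int) :
    (((pvSingleL nodes edges).filter (fun q => q.1 == p.2)).map (fun q => q.2)).countP
        (fun b => decide ((p.1, b) ∈ PySem.Set.ofList (pvSingleL nodes edges)))
      = (pvFib nodes edges p).card := by
  set L := (((pvSingleL nodes edges).filter (fun q => q.1 == p.2)).map (fun q => q.2)) with hL
  have hnodup : L.Nodup := by
    apply List.Nodup.map_on
    · intro x hx y hy hxy
      have hx1 : x.1 = p.2 := by simpa using (List.of_mem_filter hx)
      have hy1 : y.1 = p.2 := by simpa using (List.of_mem_filter hy)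
      exact Prod.ext (hx1.trans hy1.symm) hxy
    · exact (nodup_pvSingleL nodes edges).filter _
  have hnodup2 : (L.filter (fun b => decide ((p.1, b) ∈ PySem.Set.ofList (pvSingleL nodes edges)))).Nodup :=
    hnodup.filter _
  rw [List.countP_eq_length_filter, ← List.toFinset_card_of_nodup hnodup2]
  congr 1
  apply Finset.ext; intro b
  simp only [List.mem_toFinset, List.mem_filter, hL, List.mem_map, pvFib, Finset.mem_filter,
    PySem.Set.mem_ofList, decide_eq_true_eq, beq_iff_eq]
  constructor
  · rintro ⟨⟨q, ⟨hq, hq1⟩, rfl⟩, hb⟩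
    have h2 := (mem_pvSingleL nodes edges q).1 hq
    refine ⟨h2.2.2.1, ?_, hb⟩
    obtain ⟨q1, q2⟩ := q
    simp only at hq1
    rwa [hq1] at hq
  · rintro ⟨_, h1, h2⟩
    exact ⟨⟨(p.2, b), ⟨h1, rfl⟩, rfl⟩, h2⟩

lemma B_char (nodes : List Int) (edges : List (Int × Int)) :
    triad_7_alt nodes edges =
      ((pvSingleL nodes edges).map (fun p =>
        (((pvFib nodes edges p).card : Int)))).sum := by
  have h0 : triad_7_alt nodes edges =
      (pvSingleL nodes edges).foldl (fun cnt p =>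
        ((((pvSingleL nodes edges).foldl (fun d q => d.modify q.1 [] (· ++ [q.2]))
            PySem.Dict.empty).getD p.2 []).foldl
          (fun cnt b => if (p.1, b) ∈ PySem.Set.ofList (pvSingleL nodes edges) then cnt + 1 else cnt) cnt)) 0 := rfl
  rw [h0]
  have hbody : ∀ (cnt : Int) (p : Int × Int), p ∈ pvSingleL nodes edges →
      ((((pvSingleL nodes edges).foldl (fun d q => d.modify q.1 [] (· ++ [q.2]))
            PySem.Dict.empty).getD p.2 []).foldl
          (fun cnt b => if (p.1, b) ∈ PySem.Set.ofList (pvSingleL nodes edges) then cnt + 1 else cnt) cnt)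
        = cnt + ((pvFib nodes edges p).card : Int) := by
    intro cnt p _
    rw [PySem.Dict.getD_foldl_modify_append, PySem.Dict.getD_empty, List.nil_append,
      PySem.List.foldl_ite_add_one, fib_count]
  rw [PySem.List.foldl_congr_mem (pvSingleL nodes edges) _
      (fun cnt p => cnt + ((pvFib nodes edges p).card : Int)) 0 hbody,
    PySem.List.foldl_add, zero_add]

-- ---------- A characterization ----------
def pvTrips (nodes : List Int) : List (Int × Int × Int) :=
  nodes.flatMap (fun a => nodes.flatMap (fun b => nodes.map (fun c => (a, b, c))))

def pvCB (edges : List (Int × Int)) (t : Int × Int × Int) : Bool :=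
  decide (t.2.1 ≠ t.1) &&
  (decide ((t.1, t.2.1) ∈ edges) && !decide ((t.2.1, t.1) ∈ edges)) &&
  (decide (t.2.2 ≠ t.2.1) && decide (t.2.2 ≠ t.1)) &&
  (decide ((t.2.2, t.2.1) ≠ (t.1, t.2.2)) && decide ((t.1, t.2.2) ≠ (t.1, t.2.1))) &&
  (decide ((t.2.2, t.2.1) ∈ edges) && decide ((t.1, t.2.2) ∈ edges) &&
   !decide ((t.2.2, t.1) ∈ edges) && !decide ((t.2.1, t.2.2) ∈ edges))

def pvKs (nodes : List Int) (edges : List (Int × Int)) : List (List Int) :=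
  ((pvTrips nodes).filter (pvCB edges)).map pvKey

def pvStep (edges : List (Int × Int)) (st : PySem.Set (List Int) × Int) (t : Int × Int × Int) :
    PySem.Set (List Int) × Int :=
  if pvCB edges t then
    (if pvKey t ∉ st.1 then (PySem.Set.add st.1 (pvKey t), st.2 + 1) else st) else st

lemma foldl_flatMap' {α β γ : Type} (l : List α) (f : α → List β) (g : γ → β → γ) (init : γ) :
    (l.flatMap f).foldl g init = l.foldl (fun acc x => (f x).foldl g acc) init := by
  induction l generalizing init with
  | nil => simp
  | cons a l ih => simp [List.flatMap_cons, List.foldl_append, ih]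

lemma A_flat (nodes : List Int) (edges : List (Int × Int)) (st : PySem.Set (List Int) × Int) :
    nodes.foldl (fun (st : PySem.Set (List Int) × Int) node_a =>
      nodes.foldl (fun st node_b =>
        if node_b ≠ node_a then
          if (node_a, node_b) ∈ edges ∧ (node_b, node_a) ∉ edges then
            nodes.foldl (fun st node_c =>
              if node_c ≠ node_b ∧ node_c ≠ node_a then
                if (node_c, node_b) ≠ (node_a, node_c) ∧ (node_a, node_c) ≠ (node_a, node_b) then
                  if (node_c, node_b) ∈ edges ∧ (node_a, node_c) ∈ edges ∧
                     (node_c, node_a) ∉ edges ∧ (node_b, node_c) ∉ edges then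
                    let triad := PySem.List.sorted [node_a, node_b, node_c] (fun x => x) false
                    if triad ∉ st.1 then (PySem.Set.add st.1 triad, st.2 + 1) else st
                  else st
                else st
              else st) st
          else st
        else st) st) st
    = (pvTrips nodes).foldl (pvStep edges) st := by
  rw [pvTrips, foldl_flatMap']
  apply PySem.List.foldl_congr_mem
  intro st a _
  rw [foldl_flatMap']
  apply PySem.List.foldl_congr_mem
  intro st b _
  rw [List.foldl_map]
  by_cases h1 : b ≠ a
  · by_cases h2 : (a, b) ∈ edges ∧ (b, a) ∉ edges
    · rw [if_pos h1, if_pos h2]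
      apply PySem.List.foldl_congr_mem
      intro st c _
      simp only [pvStep, pvCB, pvKey, Bool.and_eq_true, decide_eq_true_eq,
        Bool.not_eq_eq_eq_not, Bool.not_true, decide_eq_false_iff_not]
      split_ifs <;> tauto
    · rw [if_pos h1, if_neg h2]
      rw [PySem.List.foldl_congr_mem nodes _ (fun st _ => st) st
        (by intro st c _; simp [pvStep, pvCB, h2])]
      exact (PySem.List.foldl_ignore nodes st).symm
  · rw [if_neg h1]
    rw [PySem.List.foldl_congr_mem nodes _ (fun st _ => st) st
      (by intro st c _; simp [pvStep, pvCB, h1])]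
    exact (PySem.List.foldl_ignore nodes st).symm

lemma count_inv (edges : List (Int × Int)) (ts : List (Int × Int × Int)) :
    ∀ (s : PySem.Set (List Int)) (n : Int),
      (ts.foldl (pvStep edges) (s, n)).1
          = PySem.Set.update s ((ts.filter (pvCB edges)).map pvKey) ∧
      (ts.foldl (pvStep edges) (s, n)).2
          = n + ((PySem.Set.update s ((ts.filter (pvCB edges)).map pvKey)).length : Int)
              - (s.length : Int) := by
  induction ts with
  | nil => intro s n; simp [PySem.Set.update]
  | cons t ts ih =>
    intro s n
    by_cases hc : pvCB edges t
    · rw [List.foldl_cons, List.filter_cons_of_pos hc, List.map_cons, PySem.Set.update_cons]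
      by_cases hk : pvKey t ∈ s
      · have hstep : pvStep edges (s, n) t = (s, n) := by
          simp [pvStep, hc, hk]
        rw [hstep, PySem.Set.add_of_mem hk]
        exact ih s n
      · have hstep : pvStep edges (s, n) t = (s ++ [pvKey t], n + 1) := by
          simp [pvStep, hc, hk]
        rw [hstep, PySem.Set.add_of_not_mem hk]
        obtain ⟨ih1, ih2⟩ := ih (s ++ [pvKey t]) (n + 1)
        refine ⟨ih1, ?_⟩
        rw [ih2]
        simp
        omega
    · rw [List.foldl_cons, List.filter_cons_of_neg hc]
      have hstep : pvStep edges (s, n) t = (s, n) := by simp [pvStep, hc]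
      rw [hstep]
      exact ih s n

lemma A_char (nodes : List Int) (edges : List (Int × Int)) :
    triad_7 nodes edges = ((PySem.Set.ofList (pvKs nodes edges)).length : Int) := by
  unfold triad_7
  rw [A_flat]
  have h := (count_inv edges (pvTrips nodes) PySem.Set.empty 0).2
  rw [h]
  have he : (PySem.Set.empty : PySem.Set (List Int)) = ([] : List (List Int)) := rfl
  rw [he, PySem.Set.update_nil_left]
  simp [pvKs]

lemma mem_pvTrips (nodes : List Int) (t : Int × Int × Int) :
    t ∈ pvTrips nodes ↔ t.1 ∈ nodes ∧ t.2.1 ∈ nodes ∧ t.2.2 ∈ nodes := by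
  obtain ⟨a, b, c⟩ := t
  simp only [pvTrips, List.mem_flatMap, List.mem_map, Prod.mk.injEq]
  constructor
  · rintro ⟨a', ha, b', hb, c', hc, rfl, rfl, rfl⟩
    exact ⟨ha, hb, hc⟩
  · rintro ⟨ha, hb, hc⟩
    exact ⟨a, ha, b, hb, c, hc, rfl, rfl, rfl⟩

lemma ks_toFinset (nodes : List Int) (edges : List (Int × Int)) :
    (pvKs nodes edges).toFinset = (pvT nodes edges).image pvKey := by
  have hbase : ((pvTrips nodes).filter (pvCB edges)).toFinset = pvT nodes edges := by
    apply Finset.ext; intro t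
    obtain ⟨a, b, c⟩ := t
    simp only [List.mem_toFinset, List.mem_filter, mem_pvTrips, pvT, Finset.mem_filter,
      Finset.mem_product, List.mem_toFinset, pvQualB, pvCB, Bool.and_eq_true, decide_eq_true_eq,
      Bool.not_eq_eq_eq_not, Bool.not_true, decide_eq_false_iff_not, mem_pvSingleL, pvSgl,
      ne_eq, Prod.mk.injEq, not_and]
    constructor
    · rintro ⟨⟨ha, hb, hc⟩, ⟨⟨⟨hba, hab, hnba⟩, hcb, hca⟩, -, -⟩, ⟨⟨hcb2, hac⟩, hnca⟩, hnbc⟩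
      exact ⟨⟨ha, hb, hc⟩, ⟨⟨hab, ha, hb, fun h => hba h.symm, hnba⟩, hac, ha, hc,
        fun h => hca h.symm, hnca⟩, hcb2, hc, hb, hcb, hnbc⟩
    · rintro ⟨⟨ha, hb, hc⟩, ⟨⟨hab, -, -, hne1, hnba⟩, hac, -, -, hne2, hnca⟩, hcb, -, -, hne3, hnbc⟩
      exact ⟨⟨ha, hb, hc⟩, ⟨⟨⟨fun h => hne1 h.symm, hab, hnba⟩, hne3, fun h => hne2 h.symm⟩,
        fun h1 _ => hne2 h1.symm, fun _ => hne3⟩, ⟨⟨hcb, hac⟩, hnca⟩, hnbc⟩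
  rw [pvKs]
  apply Finset.ext; intro y
  simp only [List.mem_toFinset, List.mem_map, Finset.mem_image]
  constructor
  · rintro ⟨t, ht, rfl⟩
    exact ⟨t, by rw [← hbase]; exact List.mem_toFinset.2 ht, rfl⟩
  · rintro ⟨t, ht, rfl⟩
    exact ⟨t, List.mem_toFinset.1 (by rw [hbase]; exact ht), rfl⟩

lemma mem_pvT (nodes : List Int) (edges : List (Int × Int)) (a b c : Int) :
    (a, b, c) ∈ pvT nodes edges ↔
      pvSgl nodes edges (a, b) ∧ pvSgl nodes edges (a, c) ∧ pvSgl nodes edges (c, b) := by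
  simp only [pvT, Finset.mem_filter, Finset.mem_product, List.mem_toFinset, pvQualB,
    Bool.and_eq_true, decide_eq_true_eq, mem_pvSingleL]
  unfold pvSgl
  tauto

lemma key_injOn (nodes : List Int) (edges : List (Int × Int)) :
    Set.InjOn pvKey (pvT nodes edges) := by
  rintro ⟨a, b, c⟩ ht ⟨a', b', c'⟩ ht' hk
  obtain ⟨⟨eab, -, -, nab, nba⟩, ⟨eac, -, -, nac, nca⟩, ⟨ecb, -, -, ncb, nbc⟩⟩ :=
    (mem_pvT nodes edges a b c).1 (Finset.mem_coe.1 ht)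
  obtain ⟨⟨eab', -, -, nab', nba'⟩, ⟨eac', -, -, nac', nca'⟩, ⟨ecb', -, -, ncb', nbc'⟩⟩ :=
    (mem_pvT nodes edges a' b' c').1 (Finset.mem_coe.1 ht')
  simp only [pvKey] at hk
  have hmem : ∀ x : Int, (x = a ∨ x = b ∨ x = c) ↔ (x = a' ∨ x = b' ∨ x = c') := by
    intro x
    have h1 := PySem.List.mem_sorted [a, b, c] (fun y => y) false x
    have h2 := PySem.List.mem_sorted [a', b', c'] (fun y => y) false x
    simp only [List.mem_cons, List.not_mem_nil, or_false] at h1 h2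
    rw [← h1, ← h2, hk]
  simp only [Prod.mk.injEq]
  rcases (hmem a').mpr (Or.inl rfl) with h | h | h
  · subst h
    rcases (hmem b').mpr (Or.inr (Or.inl rfl)) with h | h | h
    · exact absurd h.symm nab'
    · subst h
      rcases (hmem c').mpr (Or.inr (Or.inr rfl)) with h | h | h
      · exact absurd h.symm nac'
      · exact absurd h ncb'
      · exact ⟨rfl, rfl, h.symm⟩
    · subst h
      rcases (hmem c').mpr (Or.inr (Or.inr rfl)) with h | h | h
      · exact absurd h.symm nac'
      · subst h; exact absurd ecb' nbc
      · exact absurd h ncb'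
  · subst h
    rcases (hmem b').mpr (Or.inr (Or.inl rfl)) with h | h | h
    · subst h; exact absurd eab' nba
    · exact absurd h.symm nab'
    · subst h; exact absurd eab' nbc
  · subst h
    rcases (hmem b').mpr (Or.inr (Or.inl rfl)) with h | h | h
    · subst h; exact absurd eab' nca
    · subst h
      rcases (hmem c').mpr (Or.inr (Or.inr rfl)) with h | h | h
      · subst h; exact absurd eac' nca
      · exact absurd h ncb'
      · exact absurd h.symm nac'
    · exact absurd h.symm nab'

def pvF (nodes : List Int) (edges : List (Int × Int)) (p : Int × Int) :
    Finset (Int × Int × Int) :=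
  (pvFib nodes edges p).image (fun b => (p.1, b, p.2))

lemma mem_pvFib (nodes : List Int) (edges : List (Int × Int)) (p : Int × Int) (b : Int) :
    b ∈ pvFib nodes edges p ↔
      b ∈ nodes ∧ pvSgl nodes edges (p.2, b) ∧ pvSgl nodes edges (p.1, b) := by
  simp [pvFib, Finset.mem_filter, List.mem_toFinset, mem_pvSingleL]

lemma T_biUnion (nodes : List Int) (edges : List (Int × Int)) :
    pvT nodes edges = (pvSingleL nodes edges).toFinset.biUnion (pvF nodes edges) := by
  apply Finset.ext
  rintro ⟨a, b, c⟩
  simp only [Finset.mem_biUnion, List.mem_toFinset, pvF, Finset.mem_image, mem_pvT,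
    mem_pvFib, mem_pvSingleL]
  constructor
  · rintro ⟨h1, h2, h3⟩
    exact ⟨(a, c), h2, b, ⟨h1.2.2.1, h3, h1⟩, rfl⟩
  · rintro ⟨p, hp, b0, ⟨-, h3, h1⟩, heq⟩
    obtain ⟨rfl, rfl, rfl⟩ : a = p.1 ∧ b = b0 ∧ c = p.2 := by
      simpa [Prod.ext_iff] using heq.symm
    exact ⟨h1, by simpa using hp, h3⟩

lemma T_card_sum (nodes : List Int) (edges : List (Int × Int)) :
    (pvT nodes edges).card =
      ∑ p ∈ (pvSingleL nodes edges).toFinset, (pvFib nodes edges p).card := by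
  rw [T_biUnion, Finset.card_biUnion]
  · apply Finset.sum_congr rfl
    intro p _
    apply Finset.card_image_of_injective
    intro x y hxy
    simpa [Prod.ext_iff] using hxy
  · intro p _ q _ hne
    rw [Function.onFun, Finset.disjoint_left]
    rintro t ht ht'
    simp only [pvF, Finset.mem_image] at ht ht'
    obtain ⟨b, -, rfl⟩ := ht
    obtain ⟨b', -, heq⟩ := ht'
    apply hne
    obtain ⟨h1, -, h2⟩ : q.1 = p.1 ∧ b' = b ∧ q.2 = p.2 := by simpa [Prod.ext_iff] using heq
    exact Prod.ext h1.symm h2.symm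

-- ===== VERDICT (by name: the statement is the Claim_ definition above) =====
theorem triad_7_spec : Claim_equal_triad_7 := by
  intro nodes edges _
  unfold Spec_triad_7
  rw [A_char, B_char]
  have hlen : (PySem.Set.ofList (pvKs nodes edges)).length = (pvKs nodes edges).toFinset.card := by
    rw [← List.toFinset_card_of_nodup (PySem.Set.nodup_ofList _)]
    congr 1
    apply Finset.ext; intro x
    simp [List.mem_toFinset, PySem.Set.mem_ofList]
  rw [hlen, ks_toFinset, Finset.card_image_of_injOn (key_injOn nodes edges), T_card_sum]
  rw [List.sum_toFinset _ (nodup_pvSingleL nodes edges)] 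
  push_cast
  simp [List.map_map]
  rfl
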